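-- pv_equiv track=rewrite | github.com/JuanSamuelArbelaez/Serie-Fibonacci | punto 3 del parcial 4.py | filtrar_Intervalo
-- ===== SOURCE A (Python) =====
-- def filtrar_Intervalo(mayor, menor):
--     contador=0
--     for i in range (menor, mayor):
--         digito1=i%10 #Si el numero es 134, se obtiene 4
--         digito2=(i%100)//10 #Si el numero es 134, se obtiene 3
--         if digito1==digito2:
--             contador+=1
--     return contador
-- ===== SOURCE B (Python) =====
-- def filtrar_Intervalo(mayor, menor):
--     # Closed-form: numbers with equal last two digits are exactly those
--     # congruent to one of 0,11,22,...,99 modulo 100; count each residue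
--     # class in [menor, mayor) arithmetically.
--     if mayor <= menor:
--         return 0
--     total = 0
--     for r in range(0, 100, 11):
--         total += (mayor - r - 1) // 100 - (menor - r - 1) // 100
--     return total
-- ===== Notes on version B (the rewrite author's own statement) =====
-- stated objective: faster
-- what changed: replaces the per-integer scan of [menor,mayor) by a closed-form count of the ten residue classes 0,11,...,99 mod 100 via floor division
import Mathlib
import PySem

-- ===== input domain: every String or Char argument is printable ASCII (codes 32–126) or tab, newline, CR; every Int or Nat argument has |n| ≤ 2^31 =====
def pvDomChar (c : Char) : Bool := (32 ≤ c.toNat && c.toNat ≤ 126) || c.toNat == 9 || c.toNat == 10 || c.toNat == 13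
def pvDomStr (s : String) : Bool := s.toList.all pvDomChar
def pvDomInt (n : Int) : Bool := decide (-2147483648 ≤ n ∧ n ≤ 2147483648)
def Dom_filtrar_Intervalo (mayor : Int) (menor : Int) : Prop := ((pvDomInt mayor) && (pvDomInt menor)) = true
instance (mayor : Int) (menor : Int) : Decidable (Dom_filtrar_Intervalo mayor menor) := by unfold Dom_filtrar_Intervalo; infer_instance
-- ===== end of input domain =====

-- B replaces A's per-integer scan of [menor, mayor) by a closed-form count of the
-- ten residue classes 0,11,…,99 (mod 100) via floor division (objective: faster).

-- ===== PORT A =====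
def filtrar_Intervalo (mayor : Int) (menor : Int) : Int :=
  (PySem.List.pyRange menor mayor 1).foldl
    (fun contador i =>
      let digito1 := PySem.Int.mod i 10
      let digito2 := PySem.Int.floordiv (PySem.Int.mod i 100) 10
      if digito1 == digito2 then contador + 1 else contador) 0

-- ===== PORT B =====
def filtrar_Intervalo_alt (mayor : Int) (menor : Int) : Int :=
  if mayor ≤ menor then 0
  else
    (PySem.List.pyRange 0 100 11).foldl
      (fun total r =>
        total + (PySem.Int.floordiv (mayor - r - 1) 100
                 - PySem.Int.floordiv (menor - r - 1) 100)) 0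

-- ===== PRECONDITION & SPEC =====
def Spec_filtrar_Intervalo (mayor : Int) (menor : Int) (out : Int) : Prop := out = filtrar_Intervalo_alt mayor menor
instance (mayor : Int) (menor : Int) (out : Int) : Decidable (Spec_filtrar_Intervalo mayor menor out) := by unfold Spec_filtrar_Intervalo; infer_instance

-- ===== CLAIM (what is proved, stated in full; the proofs are below) =====
def Claim_equal_filtrar_Intervalo : Prop := ∀ (mayor : Int) (menor : Int), Dom_filtrar_Intervalo mayor menor → Spec_filtrar_Intervalo mayor menor (filtrar_Intervalo mayor menor)

-- ===== LEMMAS AND PROOFS =====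

-- one residue-class term of B's sum
def pvF (x r : Int) : Int := PySem.Int.floordiv (x - r - 1) 100

-- B's sum written out over the literal residue list
def pvT (a b : Int) : Int :=
  (pvF a 0 - pvF b 0) + (pvF a 11 - pvF b 11) + (pvF a 22 - pvF b 22) +
  (pvF a 33 - pvF b 33) + (pvF a 44 - pvF b 44) + (pvF a 55 - pvF b 55) +
  (pvF a 66 - pvF b 66) + (pvF a 77 - pvF b 77) + (pvF a 88 - pvF b 88) +
  (pvF a 99 - pvF b 99)

lemma pvRange_lit : PySem.List.pyRange 0 100 11 = [0, 11, 22, 33, 44, 55, 66, 77, 88, 99] := by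
  decide

lemma pvAlt_eq_T (a b : Int) (h : ¬ a ≤ b) : filtrar_Intervalo_alt a b = pvT a b := by
  simp only [filtrar_Intervalo_alt, pvRange_lit, List.foldl, if_neg h, pvT, pvF]
  ring

lemma pvT_self (b : Int) : pvT b b = 0 := by
  simp [pvT]

-- one full check over a residue m ∈ [0,100): the ten floor terms step by exactly
-- the "equal last two digits" indicator
lemma pvKey (m : Int) (h0 : 0 ≤ m) (h1 : m < 100) :
    ((m-0)/100 - (m-0-1)/100) + ((m-11)/100 - (m-11-1)/100)
    + ((m-22)/100 - (m-22-1)/100) + ((m-33)/100 - (m-33-1)/100)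
    + ((m-44)/100 - (m-44-1)/100) + ((m-55)/100 - (m-55-1)/100)
    + ((m-66)/100 - (m-66-1)/100) + ((m-77)/100 - (m-77-1)/100)
    + ((m-88)/100 - (m-88-1)/100) + ((m-99)/100 - (m-99-1)/100)
    = if m % 10 = m / 10 then (1 : Int) else 0 := by
  interval_cases m <;> decide

lemma pvT_step (a b : Int) :
    pvT (a + 1) b = pvT a b +
      (if PySem.Int.mod a 10 == PySem.Int.floordiv (PySem.Int.mod a 100) 10 then (1 : Int) else 0) := by
  obtain ⟨q, m, h0, h1, rfl⟩ : ∃ q m : Int, 0 ≤ m ∧ m < 100 ∧ a = 100 * q + m :=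
    ⟨a / 100, a % 100, Int.emod_nonneg a (by norm_num), Int.emod_lt_of_pos a (by norm_num),
      (Int.mul_ediv_add_emod a 100).symm⟩
  have hmod10 : PySem.Int.mod (100 * q + m) 10 = m % 10 := by
    rw [PySem.Int.mod_eq_emod_of_pos (by norm_num),
      show 100 * q + m = m + 10 * (10 * q) by ring, Int.add_mul_emod_self_left]
  have hmod100 : PySem.Int.mod (100 * q + m) 100 = m := by
    rw [PySem.Int.mod_eq_emod_of_pos (by norm_num),
      show 100 * q + m = m + 100 * q by ring, Int.add_mul_emod_self_left,
      Int.emod_eq_of_lt h0 h1]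
  have hdiv10 : PySem.Int.floordiv m 10 = m / 10 :=
    PySem.Int.floordiv_eq_ediv_of_pos (by norm_num)
  have hF1 : ∀ r : Int, pvF (100 * q + m + 1) r = q + (m - r) / 100 := by
    intro r
    unfold pvF
    rw [PySem.Int.floordiv_eq_ediv_of_pos (by norm_num),
      show 100 * q + m + 1 - r - 1 = (m - r) + q * 100 by ring,
      Int.add_mul_ediv_right _ _ (by norm_num)]
    ring
  have hF0 : ∀ r : Int, pvF (100 * q + m) r = q + (m - r - 1) / 100 := by
    intro r
    unfold pvF
    rw [PySem.Int.floordiv_eq_ediv_of_pos (by norm_num),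
      show 100 * q + m - r - 1 = (m - r - 1) + q * 100 by ring,
      Int.add_mul_ediv_right _ _ (by norm_num)]
    ring
  have hk := pvKey m h0 h1
  simp only [pvT, hF1 0, hF1 11, hF1 22, hF1 33, hF1 44, hF1 55, hF1 66, hF1 77, hF1 88, hF1 99,
    hF0 0, hF0 11, hF0 22, hF0 33, hF0 44, hF0 55, hF0 66, hF0 77, hF0 88, hF0 99,
    hmod10, hmod100, hdiv10, beq_iff_eq]
  split_ifs at hk ⊢ with h <;> linarith [hk]

lemma pvA_eq_T : ∀ (n : Nat) (a b : Int), (a - b).toNat = n → b ≤ a →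
    filtrar_Intervalo a b = pvT a b := by
  intro n
  induction n with
  | zero =>
    intro a b hn hba
    have : a = b := by omega
    subst this
    simp [filtrar_Intervalo, PySem.List.pyRange_one_eq_nil le_rfl, pvT_self]
  | succ k ih =>
    intro a b hn hba
    have hlt : b ≤ a - 1 := by omega
    have hsplit : PySem.List.pyRange b a 1 = PySem.List.pyRange b (a - 1) 1 ++ [a - 1] := by
      have h := PySem.List.pyRange_one_succ_right (a := b) (b := a - 1) hlt
      rw [show a - 1 + 1 = a by ring] at h
      exact h
    have hih := ih (a - 1) b (by omega) hlt
    have hT := pvT_step (a - 1) b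
    rw [show a - 1 + 1 = a by ring] at hT
    simp only [filtrar_Intervalo] at hih ⊢
    rw [hsplit, List.foldl_append, hih]
    simp only [List.foldl]
    rw [hT]
    simp only [beq_iff_eq, PySem.Int.mod_eq_emod_of_pos (show (0:Int) < 10 by norm_num),
      PySem.Int.mod_eq_emod_of_pos (show (0:Int) < 100 by norm_num),
      PySem.Int.floordiv_eq_ediv_of_pos (show (0:Int) < 10 by norm_num)]
    split_ifs <;> ring

-- ===== VERDICT (by name: the statement is the Claim_ definition above) =====
theorem filtrar_Intervalo_spec : Claim_equal_filtrar_Intervalo := by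
  intro mayor menor _
  unfold Spec_filtrar_Intervalo
  by_cases h : mayor ≤ menor
  · simp [filtrar_Intervalo, filtrar_Intervalo_alt, PySem.List.pyRange_one_eq_nil h, h]
  · rw [pvAlt_eq_T mayor menor h,
      pvA_eq_T (mayor - menor).toNat mayor menor rfl (by omega)]
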